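-- pv_equiv track=rewrite | github.com/AmitabhainArunachala/clawd | coordination/heartbeat_cascade.py | _calculate_health
-- ===== SOURCE A (Python) =====
-- from typing import Dict, Any, List, Optional
--
-- def _calculate_health(results: Dict[str, Any]) -> str:
--     """Calculate overall system health."""
--     statuses = [r.get("status", "unknown") for r in results.values()]
--
--     if any(s == "error" for s in statuses):
--         return "critical"
--     elif any(s == "timeout" for s in statuses):
--         return "degraded"
--     elif any(s == "warning" for s in statuses):
--         return "warning"
--     else:
--         return "healthy"
-- ===== SOURCE B (Python) =====
-- def _calculate_health(results):
--     """Calculate overall system health."""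
--     rank = {"error": 3, "timeout": 2, "warning": 1}
--     sev = 0
--     for r in results.values():
--         sev = max(sev, rank.get(r.get("status", "unknown"), 0))
--     return ["healthy", "warning", "degraded", "critical"][sev]
-- ===== Notes on version B (the rewrite author's own statement) =====
-- stated objective: alternative
-- what changed: Replaces three prioritized any() scans over the status list with a single fold computing a numeric worst-severity rank (via a severity dict) and a label table indexed by that rank.
import Mathlib
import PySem

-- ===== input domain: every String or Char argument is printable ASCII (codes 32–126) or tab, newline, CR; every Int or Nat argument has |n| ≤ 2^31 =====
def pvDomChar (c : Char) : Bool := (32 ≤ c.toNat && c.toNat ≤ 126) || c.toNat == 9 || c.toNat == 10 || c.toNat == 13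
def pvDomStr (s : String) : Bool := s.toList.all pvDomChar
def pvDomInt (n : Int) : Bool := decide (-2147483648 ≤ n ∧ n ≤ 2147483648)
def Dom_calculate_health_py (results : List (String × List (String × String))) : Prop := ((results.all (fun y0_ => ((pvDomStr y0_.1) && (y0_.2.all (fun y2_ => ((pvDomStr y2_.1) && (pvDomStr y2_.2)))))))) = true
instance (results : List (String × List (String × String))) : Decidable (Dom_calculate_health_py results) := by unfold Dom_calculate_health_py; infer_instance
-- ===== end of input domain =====

-- ===== PORT A =====
-- B replaces A's three prioritized any() scans with one fold computing a numeric
-- worst-severity rank plus a label table (objective: alternative decomposition, same O(n)).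
-- Shared literal transliteration of r.get("status", "unknown") on the inner dict.
def statusOf (r : List (String × String)) : String :=
  PySem.Dict.getD (PySem.Dict.mk r) "status" "unknown"

def calculate_health_py (results : List (String × List (String × String))) : String :=
  let statuses := results.map (fun p => statusOf p.2)
  if statuses.any (fun s => s == "error") then "critical"
  else if statuses.any (fun s => s == "timeout") then "degraded"
  else if statuses.any (fun s => s == "warning") then "warning"
  else "healthy"

-- ===== PORT B =====
-- B's rank dict {"error": 3, "timeout": 2, "warning": 1}.
def sevRank : PySem.Dict String Int :=
  PySem.Dict.mk [("error", 3), ("timeout", 2), ("warning", 1)]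

def calculate_health_py_alt (results : List (String × List (String × String))) : String :=
  let sev := results.foldl
    (fun acc p => max acc (PySem.Dict.getD sevRank (statusOf p.2) 0)) 0
  -- sev is always in [0,3] (proved below), so Python's list indexing never raises; getD "" is unreachable
  (PySem.List.pyGet? ["healthy", "warning", "degraded", "critical"] sev).getD ""

-- ===== PRECONDITION & SPEC =====
def Spec_calculate_health_py (results : List (String × List (String × String))) (out : String) : Prop := out = calculate_health_py_alt results
instance (results : List (String × List (String × String))) (out : String) : Decidable (Spec_calculate_health_py results out) := by unfold Spec_calculate_health_py; infer_instance

-- ===== CLAIM (what is proved, stated in full; the proofs are below) =====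
def Claim_equal_calculate_health_py : Prop := ∀ (results : List (String × List (String × String))), Dom_calculate_health_py results → Spec_calculate_health_py results (calculate_health_py results)

-- ===== LEMMAS AND PROOFS =====

def rankOf (s : String) : Int := PySem.Dict.getD sevRank s 0

def sevOf (results : List (String × List (String × String))) : Int :=
  results.foldl (fun acc p => max acc (rankOf (statusOf p.2))) 0

lemma rankOf_eq (s : String) :
    rankOf s = if s = "error" then 3 else if s = "timeout" then 2 else if s = "warning" then 1 else 0 := by
  by_cases h3 : s = "error"
  · subst h3; decide
  rw [if_neg h3]
  by_cases h2 : s = "timeout"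
  · subst h2; decide
  rw [if_neg h2]
  by_cases h1 : s = "warning"
  · subst h1; decide
  rw [if_neg h1]
  simp [rankOf, sevRank, PySem.Dict.getD_eq_get?_getD,
    PySem.Dict.get?, Ne.symm h3, Ne.symm h2, Ne.symm h1]
lemma rankOf_bounds (s : String) : 0 ≤ rankOf s ∧ rankOf s ≤ 3 := by
  rw [rankOf_eq]; split_ifs <;> omega

lemma foldl_max_shift (l : List (String × List (String × String))) (a : Int) (ha : 0 ≤ a) :
    l.foldl (fun acc p => max acc (rankOf (statusOf p.2))) a = max a (sevOf l) := by
  induction l generalizing a with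
  | nil => simp [sevOf]; omega
  | cons p l ih =>
    have hr := rankOf_bounds (statusOf p.2)
    simp only [sevOf, List.foldl_cons]
    rw [ih (max a _) (by omega), ih (max 0 _) (by omega)]
    omega

lemma sev_cons (p : String × List (String × String)) (l : List (String × List (String × String))) :
    sevOf (p :: l) = max (rankOf (statusOf p.2)) (sevOf l) := by
  have hr := rankOf_bounds (statusOf p.2)
  conv_lhs => rw [sevOf, List.foldl_cons]
  rw [foldl_max_shift l (max 0 _) (by omega)]
  omega

lemma sev_bounds (l : List (String × List (String × String))) :
    0 ≤ sevOf l ∧ sevOf l ≤ 3 := by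
  induction l with
  | nil => simp [sevOf]
  | cons p l ih => rw [sev_cons]; have := rankOf_bounds (statusOf p.2); omega

lemma sev_ge_iff (k : Int) (hk : 1 ≤ k) (l : List (String × List (String × String))) :
    k ≤ sevOf l ↔ ∃ p ∈ l, k ≤ rankOf (statusOf p.2) := by
  induction l with
  | nil => simp [sevOf]; omega
  | cons p l ih => rw [sev_cons]; simp [ih]

lemma rank_ge3 (s : String) : 3 ≤ rankOf s ↔ s = "error" := by
  rw [rankOf_eq]; split_ifs <;> simp_all

lemma rank_ge2 (s : String) : 2 ≤ rankOf s ↔ s = "error" ∨ s = "timeout" := by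
  rw [rankOf_eq]; split_ifs <;> simp_all

lemma rank_ge1 (s : String) : 1 ≤ rankOf s ↔ s = "error" ∨ s = "timeout" ∨ s = "warning" := by
  rw [rankOf_eq]; split_ifs <;> simp_all

lemma any_status_iff (l : List (String × List (String × String))) (t : String) :
    ((l.map (fun p => statusOf p.2)).any (fun s => s == t) = true) ↔ ∃ p ∈ l, statusOf p.2 = t := by
  simp [List.any_eq_true]

lemma main_eq (l : List (String × List (String × String))) :
    calculate_health_py l = calculate_health_py_alt l := by
  obtain ⟨hb0, hb3⟩ := sev_bounds l
  have halt : calculate_health_py_alt l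
      = (PySem.List.pyGet? ["healthy", "warning", "degraded", "critical"] (sevOf l)).getD "" := rfl
  rw [halt]
  show (if (l.map (fun p => statusOf p.2)).any (fun s => s == "error") then "critical"
    else if (l.map (fun p => statusOf p.2)).any (fun s => s == "timeout") then "degraded"
    else if (l.map (fun p => statusOf p.2)).any (fun s => s == "warning") then "warning"
    else "healthy") = _
  by_cases c3 : 3 ≤ sevOf l
  · have hE : (l.map (fun p => statusOf p.2)).any (fun s => s == "error") = true := by
      rw [any_status_iff]
      obtain ⟨p, hp, hr⟩ := (sev_ge_iff 3 (by omega) l).mp c3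
      exact ⟨p, hp, (rank_ge3 _).mp hr⟩
    have h3 : sevOf l = 3 := by omega
    rw [if_pos hE, h3]
    decide
  · have hnE : ¬ ∃ p ∈ l, statusOf p.2 = "error" := by
      intro ⟨p, hp, he⟩
      exact c3 ((sev_ge_iff 3 (by omega) l).mpr ⟨p, hp, (rank_ge3 _).mpr he⟩)
    have hE : (l.map (fun p => statusOf p.2)).any (fun s => s == "error") = false := by
      rw [Bool.eq_false_iff]; rw [Ne, any_status_iff]; exact hnE
    rw [if_neg (by simp [hE])]
    by_cases c2 : 2 ≤ sevOf l
    · have hT : (l.map (fun p => statusOf p.2)).any (fun s => s == "timeout") = true := by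
        rw [any_status_iff]
        obtain ⟨p, hp, hr⟩ := (sev_ge_iff 2 (by omega) l).mp c2
        rcases (rank_ge2 _).mp hr with h | h
        · exact absurd ⟨p, hp, h⟩ hnE
        · exact ⟨p, hp, h⟩
      have h2 : sevOf l = 2 := by omega
      rw [if_pos hT, h2]
      decide
    · have hnT : ¬ ∃ p ∈ l, statusOf p.2 = "timeout" := by
        intro ⟨p, hp, he⟩
        exact c2 ((sev_ge_iff 2 (by omega) l).mpr ⟨p, hp, (rank_ge2 _).mpr (Or.inr he)⟩)
      have hT : (l.map (fun p => statusOf p.2)).any (fun s => s == "timeout") = false := by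
        rw [Bool.eq_false_iff]; rw [Ne, any_status_iff]; exact hnT
      rw [if_neg (by simp [hT])]
      by_cases c1 : 1 ≤ sevOf l
      · have hW : (l.map (fun p => statusOf p.2)).any (fun s => s == "warning") = true := by
          rw [any_status_iff]
          obtain ⟨p, hp, hr⟩ := (sev_ge_iff 1 (by omega) l).mp c1
          rcases (rank_ge1 _).mp hr with h | h | h
          · exact absurd ⟨p, hp, h⟩ hnE
          · exact absurd ⟨p, hp, h⟩ hnT
          · exact ⟨p, hp, h⟩
        have h1 : sevOf l = 1 := by omega
        rw [if_pos hW, h1]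
        decide
      · have h0 : sevOf l = 0 := by omega
        have hW : (l.map (fun p => statusOf p.2)).any (fun s => s == "warning") = false := by
          rw [Bool.eq_false_iff]; rw [Ne, any_status_iff]
          intro ⟨p, hp, he⟩
          exact c1 ((sev_ge_iff 1 (by omega) l).mpr ⟨p, hp, (rank_ge1 _).mpr (Or.inr (Or.inr he))⟩)
        rw [if_neg (by simp [hW]), h0]
        decide

-- ===== VERDICT (by name: the statement is the Claim_ definition above) =====
theorem calculate_health_py_spec : Claim_equal_calculate_health_py := by
  intro results _
  unfold Spec_calculate_health_py
  exact main_eq results
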